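-- pv_equiv track=rewrite | github.com/PapaAzor/AIE3-1 | Algorythm2.py | dist_fun
-- ===== SOURCE A (Python) =====
-- cur_x=0 #current x position
--
-- cur_y=0 #current y position
--
-- lenght=0
--
-- def dist_fun(x1,y1,x2,y2):
--     cur_x=x1
--     cur_y=y1
--     tar_x=x2
--     tar_y=y2
--     lenght=0
--     while cur_x!=tar_x:
--      while cur_y!=tar_y:
--         if tar_y>cur_y:
--             lenght+=1
--             cur_y+=1
--         if tar_y<cur_y:
--             lenght+=1
--             cur_y-=1
--      if tar_x>cur_x:
--             lenght+=1
--             cur_x+=1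
--      if tar_x<cur_x:
--             lenght+=1
--             cur_x-=1
--     return lenght
-- ===== SOURCE B (Python) =====
-- def dist_fun(x1, y1, x2, y2):
--     return abs(x2 - x1) + abs(y2 - y1)
-- ===== Notes on version B (the rewrite author's own statement) =====
-- stated objective: faster
-- what changed: Replaced the step-by-step unit-move simulation loops by the closed-form Manhattan distance abs(x2-x1)+abs(y2-y1).
-- intended difference: When x1 == x2 but y1 != y2 A's outer loop never runs and it returns 0, ignoring the y distance; B returns abs(y2-y1), the intended walking distance. — e.g. on dist_fun(0, 0, 0, 1): A returns 0, B returns 1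
import Mathlib
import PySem

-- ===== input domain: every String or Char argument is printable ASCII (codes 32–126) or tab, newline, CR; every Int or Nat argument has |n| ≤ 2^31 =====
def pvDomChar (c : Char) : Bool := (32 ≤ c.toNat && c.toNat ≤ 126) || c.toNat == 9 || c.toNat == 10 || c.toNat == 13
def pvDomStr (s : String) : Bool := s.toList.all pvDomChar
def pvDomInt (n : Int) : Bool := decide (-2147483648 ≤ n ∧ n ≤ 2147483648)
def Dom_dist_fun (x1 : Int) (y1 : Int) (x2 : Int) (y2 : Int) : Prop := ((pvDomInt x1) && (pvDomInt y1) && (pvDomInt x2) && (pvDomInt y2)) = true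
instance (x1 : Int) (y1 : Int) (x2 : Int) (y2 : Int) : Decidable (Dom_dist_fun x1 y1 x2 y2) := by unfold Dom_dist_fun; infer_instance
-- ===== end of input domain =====

-- B replaces A's unit-step simulation loops by the closed-form Manhattan distance |x2-x1| + |y2-y1|;
-- on x1 = x2 ∧ y1 ≠ y2 A returns 0 (its outer loop never runs) while B returns the intended |y2-y1| (D_ below).

-- ===== PORT A =====
-- inner 'while cur_y != tar_y' loop of A, as structural recursion on a fuel that equals the exact
-- number of iterations the Python loop performs ((tar_y - cur_y).natAbs); the loop condition is
-- still re-checked every iteration.  Returns (cur_y, lenght) after the loop.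
-- (A's two sequential ifs are mutually exclusive per iteration: after the first fires,
-- cur_y ≤ tar_y, so the second cannot; the if/else here is step-exact.)
def distInnerGo (tar_y : Int) : Nat → Int → Int → Int × Int
  | 0, cur_y, lenght => (cur_y, lenght)
  | Nat.succ n, cur_y, lenght =>
    if cur_y = tar_y then (cur_y, lenght)
    else if tar_y > cur_y then distInnerGo tar_y n (cur_y + 1) (lenght + 1)
    else distInnerGo tar_y n (cur_y - 1) (lenght + 1)

def distInner (tar_y : Int) (cur_y : Int) (lenght : Int) : Int × Int :=
  distInnerGo tar_y (tar_y - cur_y).natAbs cur_y lenght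

-- outer 'while cur_x != tar_x' loop of A, fuel = (tar_x - cur_x).natAbs, its exact iteration count
-- (each iteration moves cur_x one step toward tar_x; same mutual-exclusion remark for its two ifs).
def distOuterGo (tar_x : Int) (tar_y : Int) : Nat → Int → Int → Int → Int
  | 0, _, _, lenght => lenght
  | Nat.succ n, cur_x, cur_y, lenght =>
    if cur_x = tar_x then lenght
    else
      let p := distInner tar_y cur_y lenght
      if tar_x > cur_x then distOuterGo tar_x tar_y n (cur_x + 1) p.1 (p.2 + 1)
      else distOuterGo tar_x tar_y n (cur_x - 1) p.1 (p.2 + 1)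

def dist_fun (x1 : Int) (y1 : Int) (x2 : Int) (y2 : Int) : Int :=
  distOuterGo x2 y2 (x2 - x1).natAbs x1 y1 0

-- ===== PORT B =====
def dist_fun_alt (x1 : Int) (y1 : Int) (x2 : Int) (y2 : Int) : Int :=
  |x2 - x1| + |y2 - y1|

-- ===== PRECONDITION & SPEC =====
-- When x1 = x2 but y1 ≠ y2, A's outer loop never runs and it returns 0, ignoring the y distance;
-- B returns |y2 - y1|, the intended walking distance.
def D_dist_fun (x1 : Int) (y1 : Int) (x2 : Int) (y2 : Int) : Prop := x1 = x2 ∧ y1 ≠ y2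
instance (x1 : Int) (y1 : Int) (x2 : Int) (y2 : Int) : Decidable (D_dist_fun x1 y1 x2 y2) := by unfold D_dist_fun; infer_instance
def Spec_dist_fun (x1 : Int) (y1 : Int) (x2 : Int) (y2 : Int) (out : Int) : Prop := ¬ D_dist_fun x1 y1 x2 y2 → out = dist_fun_alt x1 y1 x2 y2
instance (x1 : Int) (y1 : Int) (x2 : Int) (y2 : Int) (out : Int) : Decidable (Spec_dist_fun x1 y1 x2 y2 out) := by unfold Spec_dist_fun; infer_instance
def pvDiffWitness_dist_fun : Int × Int × Int × Int := (0, 0, 0, 1)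
def pvDiffWitnessOut_dist_fun : Int × Int := (0, 1)

-- ===== CLAIM (what is proved, stated in full; the proofs are below) =====
def Claim_unchanged_dist_fun : Prop := ∀ (x1 : Int) (y1 : Int) (x2 : Int) (y2 : Int), Dom_dist_fun x1 y1 x2 y2 → Spec_dist_fun x1 y1 x2 y2 (dist_fun x1 y1 x2 y2)
def Claim_changed_dist_fun : Prop := Dom_dist_fun (pvDiffWitness_dist_fun.1) (pvDiffWitness_dist_fun.2.1) (pvDiffWitness_dist_fun.2.2.1) (pvDiffWitness_dist_fun.2.2.2) ∧ D_dist_fun (pvDiffWitness_dist_fun.1) (pvDiffWitness_dist_fun.2.1) (pvDiffWitness_dist_fun.2.2.1) (pvDiffWitness_dist_fun.2.2.2) ∧ dist_fun (pvDiffWitness_dist_fun.1) (pvDiffWitness_dist_fun.2.1) (pvDiffWitness_dist_fun.2.2.1) (pvDiffWitness_dist_fun.2.2.2) = pvDiffWitnessOut_dist_fun.1 ∧ dist_fun_alt (pvDiffWitness_dist_fun.1) (pvDiffWitness_dist_fun.2.1) (pvDiffWitness_dist_fun.2.2.1) (pvDiffWitness_dist_fun.2.2.2) = pvDiffWitnessOut_dist_fun.2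 ∧ pvDiffWitnessOut_dist_fun.1 ≠ pvDiffWitnessOut_dist_fun.2
def Claim_exact_dist_fun : Prop := ∀ (x1 : Int) (y1 : Int) (x2 : Int) (y2 : Int), Dom_dist_fun x1 y1 x2 y2 → D_dist_fun x1 y1 x2 y2 → dist_fun x1 y1 x2 y2 ≠ dist_fun_alt x1 y1 x2 y2

-- ===== LEMMAS AND PROOFS =====

-- the inner loop drives cur_y to tar_y, adding |tar_y - cur_y| to lenght (fuel suffices)
theorem distInnerGo_eq : ∀ (n : Nat) (tar_y cur_y lenght : Int), (tar_y - cur_y).natAbs ≤ n →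
    distInnerGo tar_y n cur_y lenght = (tar_y, lenght + |tar_y - cur_y|) := by
  intro n
  induction n with
  | zero =>
    intro t c l h
    have hc : c = t := by omega
    subst hc
    simp [distInnerGo]
  | succ n ih =>
    intro t c l h
    by_cases hc : c = t
    · subst hc; simp [distInnerGo]
    · rw [distInnerGo]
      by_cases hgt : t > c
      · rw [if_neg hc, if_pos hgt, ih t (c + 1) (l + 1) (by omega)]
        refine Prod.ext rfl ?_
        simp only [Int.abs_eq_natAbs]; omega
      · rw [if_neg hc, if_neg hgt, ih t (c - 1) (l + 1) (by omega)]
        refine Prod.ext rfl ?_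
        simp only [Int.abs_eq_natAbs]; omega

-- the outer loop: nothing if cur_x = tar_x, else one inner sweep plus |tar_x - cur_x| x-steps
theorem distOuterGo_eq : ∀ (n : Nat) (tx ty cx cy l : Int), (tx - cx).natAbs = n →
    distOuterGo tx ty n cx cy l =
      if cx = tx then l else l + |ty - cy| + |tx - cx| := by
  intro n
  induction n with
  | zero =>
    intro tx ty cx cy l h
    have hc : cx = tx := by omega
    rw [distOuterGo, if_pos hc]
  | succ n ih =>
    intro tx ty cx cy l h
    have hc : ¬ cx = tx := by omega
    rw [distOuterGo, if_neg hc, if_neg hc]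
    have hi := distInnerGo_eq (ty - cy).natAbs ty cy l le_rfl
    simp only [distInner, hi]
    by_cases hgt : tx > cx
    · rw [if_pos hgt,
        ih tx ty (cx + 1) ty (l + |ty - cy| + 1) (by omega)]
      by_cases h2 : cx + 1 = tx
      · rw [if_pos h2]; simp only [Int.abs_eq_natAbs]; omega
      · rw [if_neg h2]; simp only [Int.abs_eq_natAbs]; omega
    · rw [if_neg hgt,
        ih tx ty (cx - 1) ty (l + |ty - cy| + 1) (by omega)]
      by_cases h2 : cx - 1 = tx
      · rw [if_pos h2]; simp only [Int.abs_eq_natAbs]; omega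
      · rw [if_neg h2]; simp only [Int.abs_eq_natAbs]; omega

-- ===== VERDICT (by name: the statements are the Claim_ definitions above) =====
theorem dist_fun_spec : Claim_unchanged_dist_fun := by
  intro x1 y1 x2 y2 _ hD
  rw [dist_fun, distOuterGo_eq (x2 - x1).natAbs x2 y2 x1 y1 0 rfl, dist_fun_alt]
  by_cases hx : x1 = x2
  · have hy : y1 = y2 := by by_contra hy; exact hD ⟨hx, hy⟩
    subst hx; subst hy
    simp
  · rw [if_neg hx]
    simp only [Int.abs_eq_natAbs]; omega

theorem dist_fun_changed : Claim_changed_dist_fun := by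
  unfold Claim_changed_dist_fun; decide

theorem dist_fun_tight : Claim_exact_dist_fun := by
  intro x1 y1 x2 y2 _ hD
  obtain ⟨hx, hy⟩ := hD
  subst hx
  rw [dist_fun, distOuterGo_eq (x1 - x1).natAbs x1 y2 x1 y1 0 rfl, if_pos rfl, dist_fun_alt]
  simp only [Int.abs_eq_natAbs]
  omega
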